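-- pv_equiv track=rewrite | github.com/KriSun95/heasoft-test-base | replacement_directory/6-xspec-test-result/plots.py | getSubModels
-- ===== SOURCE A (Python) =====
-- def getSubModels(data):
--     ''' Get mcount rates from the spectral fit models.
--
--     Parameters
--     ----------
--     data : str
--             The counts data from the seperate() method (a dictionary).
--
--     Returns
--     -------
--     A dictionary of the count rates.
--     '''
--     subModels = {}
--     has_total_model_been = False
--     for key in data.keys():
--         if has_total_model_been:
--             subModels[key] = data[key]
--         if key == "model_total":
--             has_total_model_been = True
--     return subModels
-- ===== SOURCE B (Python) =====
-- def getSubModels(data):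
--     ''' Get mcount rates from the spectral fit models. '''
--     items = list(data.items())
--     keys = [k for k, _ in items]
--     if "model_total" not in keys:
--         return {}
--     i = keys.index("model_total")
--     return dict(items[i + 1:])
-- ===== Notes on version B (the rewrite author's own statement) =====
-- stated objective: simpler
-- what changed: Replaces the boolean-flag state-machine loop by a two-phase decomposition: locate the 'model_total' pivot with .index once, then build the result directly from the item-list suffix after it (no per-key flag bookkeeping).
import Mathlib
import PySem

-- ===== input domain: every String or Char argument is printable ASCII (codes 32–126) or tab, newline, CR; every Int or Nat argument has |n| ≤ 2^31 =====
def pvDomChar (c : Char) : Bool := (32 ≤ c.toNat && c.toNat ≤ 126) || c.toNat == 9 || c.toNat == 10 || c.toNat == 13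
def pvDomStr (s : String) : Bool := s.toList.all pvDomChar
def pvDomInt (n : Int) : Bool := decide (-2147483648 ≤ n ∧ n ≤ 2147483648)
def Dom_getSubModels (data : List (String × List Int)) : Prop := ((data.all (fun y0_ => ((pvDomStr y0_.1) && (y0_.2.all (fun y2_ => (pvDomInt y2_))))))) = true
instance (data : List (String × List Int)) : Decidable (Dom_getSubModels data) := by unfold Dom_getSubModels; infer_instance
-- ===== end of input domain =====

-- B replaces A's boolean-flag state-machine loop by a two-phase decomposition
-- (find the 'model_total' pivot, then take the item suffix after it); same cost, simpler.

-- ===== PORT A =====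
-- A iterates over the dict's keys with a 'seen model_total yet' flag, copying the
-- entries seen while the flag is set; ported as a fold over the (key, value) items
-- (data[key] of a dict is the item's value) carrying (subModels, has_total_model_been).
def getSubModels (data : List (String × List Int)) : List (String × List Int) :=
  (data.foldl
    (fun (acc : List (String × List Int) × Bool) kv =>
      ((if acc.2 then acc.1 ++ [kv] else acc.1),
       (if kv.1 = "model_total" then true else acc.2)))
    ([], false)).1

-- ===== PORT B =====
def getSubModels_alt (data : List (String × List Int)) : List (String × List Int) :=
  let keys := data.map (·.1)
  if "model_total" ∈ keys then
    match PySem.List.index? keys "model_total" with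
    | some i => PySem.List.slice data (some ((i + 1 : Nat) : Int)) none
    | none => []   -- unreachable: membership was checked
  else []

-- ===== PRECONDITION & SPEC =====
def Spec_getSubModels (data : List (String × List Int)) (out : List (String × List Int)) : Prop := out = getSubModels_alt data
instance (data : List (String × List Int)) (out : List (String × List Int)) : Decidable (Spec_getSubModels data out) := by unfold Spec_getSubModels; infer_instance

-- ===== CLAIM (what is proved, stated in full; the proofs are below) =====
def Claim_equal_getSubModels : Prop := ∀ (data : List (String × List Int)), Dom_getSubModels data → Spec_getSubModels data (getSubModels data)

-- ===== LEMMAS AND PROOFS =====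

-- the loop body of A's port, named for the lemmas
def pvStepA (acc : List (String × List Int) × Bool) (kv : String × List Int) :
    List (String × List Int) × Bool :=
  ((if acc.2 then acc.1 ++ [kv] else acc.1),
   (if kv.1 = "model_total" then true else acc.2))

theorem getSubModels_eq_foldl (data : List (String × List Int)) :
    getSubModels data = (data.foldl pvStepA ([], false)).1 := rfl

-- once the flag is true, the fold appends every remaining item
theorem foldl_pvStepA_true (l : List (String × List Int)) (acc : List (String × List Int)) :
    l.foldl pvStepA (acc, true) = (acc ++ l, true) := by
  induction l generalizing acc with
  | nil => simp
  | cons kv t ih => simp [pvStepA, ih]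

-- while the flag is false, the accumulator stays [], and the first 'model_total' flips it
theorem foldl_pvStepA_false (l : List (String × List Int)) :
    (l.foldl pvStepA ([], false)).1 = getSubModels_alt l := by
  induction l with
  | nil => simp [getSubModels_alt]
  | cons kv t ih =>
    rw [List.foldl_cons]
    by_cases h : kv.1 = "model_total"
    · have e1 : pvStepA ([], false) kv = ([], true) := by simp [pvStepA, h]
      rw [e1, foldl_pvStepA_true]
      unfold getSubModels_alt
      simp only [List.map_cons, h, List.nil_append]
      rw [PySem.List.index?_cons_self]
      simp [PySem.List.slice_from_one]
    · have e1 : pvStepA ([], false) kv = ([], false) := by simp [pvStepA, h]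
      rw [e1, ih]
      unfold getSubModels_alt
      simp only [List.map_cons]
      by_cases hm : "model_total" ∈ t.map (·.1)
      · have hmc : "model_total" ∈ kv.1 :: t.map (·.1) := List.mem_cons_of_mem _ hm
        rw [if_pos hm, if_pos hmc,
          PySem.List.index?_cons_of_ne _ (fun e => h e)]
        rcases hi : PySem.List.index? (t.map (·.1)) "model_total" with _ | i
        · rw [PySem.List.index?_eq_none_iff] at hi; exact absurd hm hi
        · simp only [hi, Option.map_some]
          rw [PySem.List.slice_from_natCast, PySem.List.slice_from_natCast]
          simp [List.drop_succ_cons]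
      · have hmc : "model_total" ∉ kv.1 :: t.map (·.1) := by
          intro hc
          rcases List.mem_cons.1 hc with e | e
          · exact h e.symm
          · exact hm e
        rw [if_neg hm, if_neg hmc]

-- ===== VERDICT (by name: the statement is the Claim_ definition above) =====
theorem getSubModels_spec : Claim_equal_getSubModels := by
  intro data _
  unfold Spec_getSubModels
  rw [getSubModels_eq_foldl, foldl_pvStepA_false]
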